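-- pv_equiv track=rewrite | github.com/liuqiangus/End-to-End-Slicing | transport/backup/tn_server_test.py | parse_database
-- ===== SOURCE A (Python) =====
-- def parse_database(database):
--
--     static_users = []
--     regular_users = []
--     const_hosts = []
--     bandwidth = []
--
--     for s_key in database.keys(): # loop for slices
--         if s_key[:-1] == 'slice':
--             for u_key in database[s_key].keys():  # loop for users
--                 if database[s_key][u_key]['static_path'] == 1:
--                     static_users.append(u_key)
--                 else:
--                     regular_users.append(u_key)
--                     bandwidth.append(database[s_key][u_key]['bandwidth'])
--         else:
--             for u_key in database[s_key].keys():  # loop for users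
--                 const_hosts.append(u_key)
--
--     # sorted them
--     indexs = sorted(range(len(regular_users)), key=regular_users.__getitem__)
--     bandwidth = [bandwidth[i] for i in indexs]
--     regular_users = [regular_users[i] for i in indexs]
--     indexs = sorted(range(len(static_users)), key=static_users.__getitem__)
--     static_users = [static_users[i] for i in indexs]
--
--     return static_users, regular_users, bandwidth, const_hosts
-- ===== SOURCE B (Python) =====
-- def parse_database(database):
--     const_hosts = [u for s, users in database.items()
--                    if s[:-1] != 'slice' for u in users]
--     static_users = sorted(u for s, users in database.items()
--                           if s[:-1] == 'slice'
--                           for u, rec in users.items() if rec['static_path'] == 1)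
--     groups = {}
--     for s, users in database.items():
--         if s[:-1] == 'slice':
--             for u, rec in users.items():
--                 if rec['static_path'] != 1:
--                     groups.setdefault(u, []).append(rec['bandwidth'])
--     regular_users = []
--     bandwidth = []
--     for u in sorted(groups):
--         bws = groups[u]
--         regular_users += [u] * len(bws)
--         bandwidth += bws
--     return static_users, regular_users, bandwidth, const_hosts
-- ===== Notes on version B (the rewrite author's own statement) =====
-- stated objective: alternative
-- what changed: Replaces the stable index-sort of two parallel user/bandwidth lists by a group-by dictionary (user -> list of bandwidths) whose distinct keys are sorted and expanded in order; const hosts and static users are collected in separate comprehension passes instead of one combined loop.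
import Mathlib
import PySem

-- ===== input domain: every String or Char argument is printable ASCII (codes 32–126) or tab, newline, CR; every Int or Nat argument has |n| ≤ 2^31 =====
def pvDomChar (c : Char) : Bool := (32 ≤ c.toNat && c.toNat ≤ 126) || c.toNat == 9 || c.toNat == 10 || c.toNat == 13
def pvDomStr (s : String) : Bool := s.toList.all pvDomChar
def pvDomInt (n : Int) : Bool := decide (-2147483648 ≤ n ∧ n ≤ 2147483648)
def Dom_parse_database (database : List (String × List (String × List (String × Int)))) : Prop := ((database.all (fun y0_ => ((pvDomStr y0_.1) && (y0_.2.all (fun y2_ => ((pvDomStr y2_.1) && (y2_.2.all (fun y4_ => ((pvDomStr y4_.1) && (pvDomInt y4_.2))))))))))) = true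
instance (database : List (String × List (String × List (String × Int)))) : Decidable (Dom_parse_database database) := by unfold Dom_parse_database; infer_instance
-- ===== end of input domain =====

-- B replaces A's stable index-sort of two parallel user/bandwidth lists by a group-by
-- dictionary (user -> bandwidths) whose distinct keys are sorted and expanded (objective: alternative).

-- ===== PORT A =====
-- A-side helpers: the bodies of A's nested loops (Python dict iteration = PySem.Dict items).
def pvA_user (acc : List String × List String × List Int × List String)
    (q : String × List (String × Int)) : List String × List String × List Int × List String :=
  if PySem.Dict.getD (PySem.Dict.ofList q.2) "static_path" 0 = 1 then
    (acc.1 ++ [q.1], acc.2.1, acc.2.2.1, acc.2.2.2)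
  else
    (acc.1, acc.2.1 ++ [q.1], acc.2.2.1 ++ [PySem.Dict.getD (PySem.Dict.ofList q.2) "bandwidth" 0], acc.2.2.2)

def pvA_slice (acc : List String × List String × List Int × List String)
    (p : String × List (String × List (String × Int))) : List String × List String × List Int × List String :=
  if PySem.List.slice p.1.toList none (some (-1)) = "slice".toList then
    ((PySem.Dict.ofList p.2).items).foldl pvA_user acc
  else
    ((PySem.Dict.ofList p.2).items).foldl
      (fun a2 q => (a2.1, a2.2.1, a2.2.2.1, a2.2.2.2 ++ [q.1])) acc

def parse_database (database : List (String × List (String × List (String × Int)))) : List String × List String × List Int × List String :=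
  let st := ((PySem.Dict.ofList database).items).foldl pvA_slice ([], [], [], [])
  let su := st.1
  let ru := st.2.1
  let bw := st.2.2.1
  let ch := st.2.2.2
  -- sorted(range(len(xs)), key=xs.__getitem__): every index is in range, so pyGetD's default is never read
  let idxs := PySem.List.sorted (PySem.List.pyRange 0 (ru.length : Int)) (fun i => PySem.List.pyGetD ru i "")
  let bw' := idxs.map (fun i => PySem.List.pyGetD bw i 0)
  let ru' := idxs.map (fun i => PySem.List.pyGetD ru i "")
  let idxs2 := PySem.List.sorted (PySem.List.pyRange 0 (su.length : Int)) (fun i => PySem.List.pyGetD su i "")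
  (idxs2.map (fun i => PySem.List.pyGetD su i ""), ru', bw', ch)

-- ===== PORT B =====
-- B's comprehension passes and its group-by loop; groups[u] in the final loop is total
-- (u ranges over the dict's own keys), so it is ported as getD with an unread default.
def parse_database_alt (database : List (String × List (String × List (String × Int)))) : List String × List String × List Int × List String :=
  let I := (PySem.Dict.ofList database).items
  let ch := I.flatMap (fun p =>
    if PySem.List.slice p.1.toList none (some (-1)) ≠ "slice".toList
    then ((PySem.Dict.ofList p.2).items).map (fun q => q.1) else [])
  let su := PySem.List.sorted
    (I.flatMap (fun p =>
      if PySem.List.slice p.1.toList none (some (-1)) = "slice".toList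
      then ((PySem.Dict.ofList p.2).items).flatMap (fun q =>
        if PySem.Dict.getD (PySem.Dict.ofList q.2) "static_path" 0 = 1 then [q.1] else [])
      else [])) (fun x => x)
  let groups := I.foldl (fun d p =>
    if PySem.List.slice p.1.toList none (some (-1)) = "slice".toList
    then ((PySem.Dict.ofList p.2).items).foldl (fun d q =>
      if PySem.Dict.getD (PySem.Dict.ofList q.2) "static_path" 0 ≠ 1
      then d.modify q.1 [] (fun l => l ++ [PySem.Dict.getD (PySem.Dict.ofList q.2) "bandwidth" 0])
      else d) d
    else d) (PySem.Dict.empty : PySem.Dict String (List Int))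
  let rb := (PySem.List.sorted groups.keys (fun x => x)).foldl
    (fun acc u =>
      let bws := groups.getD u []
      (acc.1 ++ List.replicate bws.length u, acc.2 ++ bws)) (([], []) : List String × List Int)
  (su, rb.1, rb.2, ch)

-- ===== PRECONDITION & SPEC =====
-- Pre_ excludes exactly the inputs where the Python raises KeyError: a user record in a
-- 'slice*' entry lacking 'static_path', or lacking 'bandwidth' when static_path != 1.
def Pre_parse_database (database : List (String × List (String × List (String × Int)))) : Prop :=
  ∀ p ∈ (PySem.Dict.ofList database).items,
    PySem.List.slice p.1.toList none (some (-1)) = "slice".toList →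
    ∀ q ∈ (PySem.Dict.ofList p.2).items,
      (PySem.Dict.ofList q.2).contains "static_path" = true ∧
      ((PySem.Dict.ofList q.2).get? "static_path" = some 1 ∨
        (PySem.Dict.ofList q.2).contains "bandwidth" = true)
instance (database : List (String × List (String × List (String × Int)))) : Decidable (Pre_parse_database database) := by unfold Pre_parse_database; infer_instance

def pvWitness_parse_database : (List (String × List (String × List (String × Int)))) :=
  [("slice1", [("u2", [("static_path", 1)]), ("u1", [("static_path", 0), ("bandwidth", 5)])]),
   ("hosts", [("h1", [])])]

def Spec_parse_database (database : List (String × List (String × List (String × Int)))) (out : List String × List String × List Int × List String) : Prop := out = parse_database_alt database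
instance (database : List (String × List (String × List (String × Int)))) (out : List String × List String × List Int × List String) : Decidable (Spec_parse_database database out) := by unfold Spec_parse_database; infer_instance

-- ===== CLAIM (what is proved, stated in full; the proofs are below) =====
def Claim_equal_parse_database : Prop := ∀ (database : List (String × List (String × List (String × Int)))), Dom_parse_database database → Pre_parse_database database → Spec_parse_database database (parse_database database)

-- ===== LEMMAS AND PROOFS =====

-- The three flatMap normal forms of the data gathered from the database.
def pvS1 (qs : List (String × List (String × Int))) : List String :=
  qs.flatMap (fun q => if PySem.Dict.getD (PySem.Dict.ofList q.2) "static_path" 0 = 1 then [q.1] else [])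
def pvP1 (qs : List (String × List (String × Int))) : List (String × Int) :=
  qs.flatMap (fun q => if PySem.Dict.getD (PySem.Dict.ofList q.2) "static_path" 0 = 1 then []
    else [(q.1, PySem.Dict.getD (PySem.Dict.ofList q.2) "bandwidth" 0)])
def pvSf (items : List (String × List (String × List (String × Int)))) : List String :=
  items.flatMap (fun p => if PySem.List.slice p.1.toList none (some (-1)) = "slice".toList
    then pvS1 (PySem.Dict.ofList p.2).items else [])
def pvPf (items : List (String × List (String × List (String × Int)))) : List (String × Int) :=
  items.flatMap (fun p => if PySem.List.slice p.1.toList none (some (-1)) = "slice".toList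
    then pvP1 (PySem.Dict.ofList p.2).items else [])
def pvHf (items : List (String × List (String × List (String × Int)))) : List String :=
  items.flatMap (fun p => if PySem.List.slice p.1.toList none (some (-1)) = "slice".toList
    then [] else ((PySem.Dict.ofList p.2).items).map (fun q => q.1))

-- A's loops compute those normal forms.
theorem pv_foldA_user (qs : List (String × List (String × Int)))
    (acc : List String × List String × List Int × List String) :
    qs.foldl pvA_user acc
      = (acc.1 ++ pvS1 qs, acc.2.1 ++ (pvP1 qs).map (fun p => p.1),
         acc.2.2.1 ++ (pvP1 qs).map (fun p => p.2), acc.2.2.2) := by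
  induction qs generalizing acc with
  | nil => simp [pvS1, pvP1]
  | cons q qs ih =>
    by_cases h : PySem.Dict.getD (PySem.Dict.ofList q.2) "static_path" 0 = 1 <;>
      simp [pvA_user, h, ih, pvS1, pvP1]

theorem pv_const_fold (items : List (String × List (String × Int)))
    (a : List String × List String × List Int × List String) :
    items.foldl (fun a2 q => (a2.1, a2.2.1, a2.2.2.1, a2.2.2.2 ++ [q.1])) a
      = (a.1, a.2.1, a.2.2.1, a.2.2.2 ++ items.map (fun q => q.1)) := by
  induction items generalizing a with
  | nil => simp
  | cons q qs ih => simp [ih]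

theorem pv_foldA_slice (items : List (String × List (String × List (String × Int))))
    (acc : List String × List String × List Int × List String) :
    items.foldl pvA_slice acc
      = (acc.1 ++ pvSf items, acc.2.1 ++ (pvPf items).map (fun p => p.1),
         acc.2.2.1 ++ (pvPf items).map (fun p => p.2), acc.2.2.2 ++ pvHf items) := by
  induction items generalizing acc with
  | nil => simp [pvSf, pvPf, pvHf]
  | cons p ps ih =>
    by_cases h : PySem.List.slice p.1.toList none (some (-1)) = ['s','l','i','c','e'] <;>
      simp [pvA_slice, h, ih, pvSf, pvPf, pvHf, pv_foldA_user, pv_const_fold]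

-- B's group-by loop is the fold of modify over the pair list.
theorem pv_groups_user (qs : List (String × List (String × Int))) (d : PySem.Dict String (List Int)) :
    qs.foldl (fun d q =>
      if PySem.Dict.getD (PySem.Dict.ofList q.2) "static_path" 0 ≠ 1
      then d.modify q.1 [] (fun l => l ++ [PySem.Dict.getD (PySem.Dict.ofList q.2) "bandwidth" 0])
      else d) d
    = (pvP1 qs).foldl (fun d p => d.modify p.1 [] (fun l => l ++ [p.2])) d := by
  induction qs generalizing d with
  | nil => simp [pvP1]
  | cons q qs ih =>
    simp only [List.foldl_cons]
    by_cases h : PySem.Dict.getD (PySem.Dict.ofList q.2) "static_path" 0 = 1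
    · rw [if_neg (not_not_intro h), ih]
      simp [pvP1, h]
    · rw [if_pos h, ih]
      simp [pvP1, h]

theorem pv_groups_slice (items : List (String × List (String × List (String × Int))))
    (d : PySem.Dict String (List Int)) :
    items.foldl (fun d p =>
      if PySem.List.slice p.1.toList none (some (-1)) = "slice".toList
      then ((PySem.Dict.ofList p.2).items).foldl (fun d q =>
        if PySem.Dict.getD (PySem.Dict.ofList q.2) "static_path" 0 ≠ 1
        then d.modify q.1 [] (fun l => l ++ [PySem.Dict.getD (PySem.Dict.ofList q.2) "bandwidth" 0])
        else d) d
      else d) d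
    = (pvPf items).foldl (fun d p => d.modify p.1 [] (fun l => l ++ [p.2])) d := by
  induction items generalizing d with
  | nil => simp [pvPf]
  | cons p ps ih =>
    simp only [List.foldl_cons]
    by_cases h : PySem.List.slice p.1.toList none (some (-1)) = "slice".toList
    · rw [if_pos h, pv_groups_user, ih]
      simp only [pvPf, List.flatMap_cons, if_pos h, List.foldl_append]
    · rw [if_neg h, ih]
      simp only [pvPf, List.flatMap_cons, if_neg h, List.nil_append]

-- insertBy walks past elements it does not go before …
theorem pv_insertBy_append {α : Type} (lt : α → α → Bool) (x : α) (l1 l2 : List α)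
    (h : ∀ y ∈ l1, lt x y = false) :
    PySem.List.insertBy lt x (l1 ++ l2) = l1 ++ PySem.List.insertBy lt x l2 := by
  induction l1 with
  | nil => rfl
  | cons y ys ih =>
    simp only [List.cons_append, PySem.List.insertBy, h y (by simp), Bool.false_eq_true,
      if_false, List.cons.injEq, true_and]
    exact ih (fun z hz => h z (by simp [hz]))

-- … and stops in front of a list it goes entirely before.
theorem pv_insertBy_front {α : Type} (lt : α → α → Bool) (x : α) (l : List α)
    (h : ∀ y ∈ l, lt x y = true) :
    PySem.List.insertBy lt x l = x :: l := by
  cases l with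
  | nil => rfl
  | cons y ys => simp [PySem.List.insertBy, h y (by simp)]

-- inserting x into a key-grouped list appends it to its own group
theorem pv_insert_group (x : String × Int) (K : List String) (hK : K.Pairwise (· < ·))
    (hx : x.1 ∈ K) (ps : List (String × Int)) :
    PySem.List.insertBy (fun a b => decide (a.1 < b.1)) x
        (K.flatMap (fun u => ps.filter (fun p => p.1 == u)))
    = K.flatMap (fun u => (ps ++ [x]).filter (fun p => p.1 == u)) := by
  induction K with
  | nil => simp at hx
  | cons u K' ih =>
    have hlt : ∀ v ∈ K', u < v := fun v hv => (List.pairwise_cons.mp hK).1 v hv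
    have hK' : K'.Pairwise (· < ·) := (List.pairwise_cons.mp hK).2
    have hgrp : ∀ y ∈ ps.filter (fun p => p.1 == u), y.1 = u := by
      intro y hy; exact beq_iff_eq.mp (List.mem_filter.mp hy).2
    simp only [List.flatMap_cons]
    by_cases hxu : x.1 = u
    · -- x belongs to the first group: it goes after that group and before the rest
      have hrest : ∀ z ∈ K'.flatMap (fun u' => ps.filter (fun p => p.1 == u')),
          (decide (x.1 < z.1)) = true := by
        intro z hz
        obtain ⟨u', hu', hzf⟩ := List.mem_flatMap.mp hz
        have : z.1 = u' := beq_iff_eq.mp (List.mem_filter.mp hzf).2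
        simp [this, hxu, hlt u' hu']
      have hfirst : ∀ y ∈ ps.filter (fun p => p.1 == u), (decide (x.1 < y.1)) = false := by
        intro y hy; simp [hgrp y hy, hxu]
      rw [pv_insertBy_append _ _ _ _ hfirst, pv_insertBy_front _ _ _ hrest]
      have hK'filter : ∀ u' ∈ K', (ps ++ [x]).filter (fun p => p.1 == u')
          = ps.filter (fun p => p.1 == u') := by
        intro u' hu'
        have : (x.1 == u') = false := by
          simp [hxu]; exact ne_of_lt (hlt u' hu')
        simp [List.filter_append, this]
      rw [List.flatMap_congr (fun u' hu' => hK'filter u' hu')]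
      simp [List.filter_append, hxu]
    · -- x belongs to a later group
      have hxK' : x.1 ∈ K' := by cases List.mem_cons.mp hx with
        | inl h => exact absurd h hxu
        | inr h => exact h
      have hfirst : ∀ y ∈ ps.filter (fun p => p.1 == u), (decide (x.1 < y.1)) = false := by
        intro y hy
        have hyu := hgrp y hy
        rw [hyu]
        simp only [decide_eq_false_iff_not]
        exact lt_asymm (hlt _ hxK')
      rw [pv_insertBy_append _ _ _ _ hfirst, ih hK' hxK']
      have : (x.1 == u) = false := by simp [hxu]
      simp [List.filter_append, this]

-- stable sort on the key = concatenation of the key groups along any strictly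
-- increasing enumeration K of (a superset of) the keys
theorem pv_group_sort (ps : List (String × Int)) (K : List String) (hK : K.Pairwise (· < ·))
    (hc : ∀ p ∈ ps, p.1 ∈ K) :
    PySem.List.sorted ps (fun p => p.1)
      = K.flatMap (fun u => ps.filter (fun p => p.1 == u)) := by
  induction ps using List.reverseRecOn with
  | nil => simp [PySem.List.sorted_eq_foldl_insertBy]
  | append_singleton ps x ih =>
    have h1 : ∀ p ∈ ps, p.1 ∈ K := fun p hp => hc p (by simp [hp])
    have hx : x.1 ∈ K := hc x (by simp)
    rw [PySem.List.sorted_eq_foldl_insertBy, List.foldl_append]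
    simp only [List.foldl_cons, List.foldl_nil]
    rw [← PySem.List.sorted_eq_foldl_insertBy, ih h1, pv_insert_group x K hK hx ps]

-- a list whose elements all have first component u projects to a replicate
theorem pv_map_fst_replicate (u : String) (l : List (String × Int)) (h : ∀ y ∈ l, y.1 = u) :
    l.map (fun p => p.1) = List.replicate (l.map (fun p => p.2)).length u := by
  induction l with
  | nil => rfl
  | cons y ys ih =>
    simp only [List.map_cons, List.length_cons, List.replicate_succ, List.cons.injEq]
    exact ⟨h y (by simp), ih (fun z hz => h z (by simp [hz]))⟩

-- the expansion loop over the sorted keys is a pair of flatMaps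
theorem pv_expand_fold (K : List String) (g : String → List String) (h : String → List Int)
    (r0 : List String) (b0 : List Int) :
    K.foldl (fun acc u => (acc.1 ++ g u, acc.2 ++ h u)) (r0, b0)
      = (r0 ++ K.flatMap g, b0 ++ K.flatMap h) := by
  induction K generalizing r0 b0 with
  | nil => simp
  | cons u K' ih => simp [ih]

-- A's index sort realises the stable sort of the underlying list (machinery).
theorem pv_insertBy_map {α β : Type} (g : α → β) (q : β → β → Bool) (x : α) (l : List α) :
    (PySem.List.insertBy (fun a b => q (g a) (g b)) x l).map g
      = PySem.List.insertBy q (g x) (l.map g) := by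
  induction l with
  | nil => rfl
  | cons y ys ih =>
    simp only [PySem.List.insertBy, List.map_cons]
    by_cases h : q (g x) (g y) = true <;> simp [h, ih]

theorem pv_sorted_foldl_map {α β κ : Type} [LT κ] [DecidableLT κ] (g : α → β) (K : β → κ)
    (l : List α) (acc : List α) :
    (l.foldl (fun acc x => PySem.List.insertBy (fun a b => decide (K (g a) < K (g b))) x acc) acc).map g
      = (l.map g).foldl (fun acc x => PySem.List.insertBy (fun a b => decide (K a < K b)) x acc) (acc.map g) := by
  induction l generalizing acc with
  | nil => rfl
  | cons x xs ih =>
    simp only [List.foldl_cons, List.map_cons, ih,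
      pv_insertBy_map g (fun a b => decide (K a < K b)) x acc]

theorem pv_sorted_map_key {α β κ : Type} [LT κ] [DecidableLT κ] (g : α → β) (K : β → κ) (l : List α) :
    (PySem.List.sorted l (fun a => K (g a))).map g = PySem.List.sorted (l.map g) K := by
  rw [PySem.List.sorted_eq_foldl_insertBy, PySem.List.sorted_eq_foldl_insertBy]
  simpa using pv_sorted_foldl_map g K l []

theorem pv_idx_sort {α κ : Type} [LT κ] [DecidableLT κ] (xs : List α) (d : α) (K : α → κ) :
    (PySem.List.sorted (PySem.List.pyRange 0 (xs.length : Int)) (fun i => K (PySem.List.pyGetD xs i d))).map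
        (fun i => PySem.List.pyGetD xs i d)
      = PySem.List.sorted xs K := by
  rw [pv_sorted_map_key (fun i => PySem.List.pyGetD xs i d) K, PySem.List.map_pyGetD_pyRange_zero']

theorem pv_srt1 (ps : List (String × Int)) :
    List.map (fun i => (PySem.List.pyGetD ps i ("", 0)).1)
      (PySem.List.sorted (PySem.List.pyRange 0 (ps.length : Int))
        (fun i => (PySem.List.pyGetD ps i ("", 0)).1))
    = List.map (fun x => x.1) (PySem.List.sorted ps (fun p => p.1)) := by
  have h := congrArg (List.map (fun x : String × Int => x.1))
    (pv_idx_sort ps ("", 0) (fun p => p.1))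
  rw [List.map_map] at h
  exact h

theorem pv_srt2 (ps : List (String × Int)) :
    List.map (fun i => (PySem.List.pyGetD ps i ("", 0)).2)
      (PySem.List.sorted (PySem.List.pyRange 0 (ps.length : Int))
        (fun i => (PySem.List.pyGetD ps i ("", 0)).1))
    = List.map (fun x => x.2) (PySem.List.sorted ps (fun p => p.1)) := by
  have h := congrArg (List.map (fun x : String × Int => x.2))
    (pv_idx_sort ps ("", 0) (fun p => p.1))
  rw [List.map_map] at h
  exact h

-- B's sorted key list: strictly increasing and covering all keys of the pair list
theorem pv_B_ru_bw (I : List (String × List (String × List (String × Int)))) :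
    (PySem.List.sorted (PySem.Set.ofList ((pvPf I).map (fun p => p.1))) (fun x => x)).flatMap
        (fun u => (pvPf I).filter (fun p => p.1 == u))
      = PySem.List.sorted (pvPf I) (fun p => p.1) := by
  refine (pv_group_sort (pvPf I) _ ?_ ?_).symm
  · exact PySem.List.sorted_ofList_pairwise_lt _
  · intro p hp
    rw [PySem.List.mem_sorted, PySem.Set.mem_ofList]
    exact List.mem_map.mpr ⟨p, hp, rfl⟩

-- ===== VERDICT (by name: the statement is the Claim_ definition above) =====
theorem parse_database_spec : Claim_equal_parse_database := by
  intro database _ _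
  unfold Spec_parse_database parse_database parse_database_alt
  dsimp only
  rw [pv_foldA_slice]
  dsimp only
  simp only [List.nil_append]
  -- A side: index sorts become stable sorts of the underlying lists
  have hk : (fun i => PySem.List.pyGetD (List.map (fun p => p.1) (pvPf ((PySem.Dict.ofList database).items))) i "")
      = (fun i => (PySem.List.pyGetD (pvPf ((PySem.Dict.ofList database).items)) i ("", 0)).1) :=
    funext fun i => PySem.List.pyGetD_map _ _ i ("", 0)
  have hv : (fun i => PySem.List.pyGetD (List.map (fun p => p.2) (pvPf ((PySem.Dict.ofList database).items))) i 0)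
      = (fun i => (PySem.List.pyGetD (pvPf ((PySem.Dict.ofList database).items)) i ("", 0)).2) :=
    funext fun i => PySem.List.pyGetD_map _ _ i ("", 0)
  rw [hk, hv, List.length_map, pv_srt1, pv_srt2, pv_idx_sort _ "" (fun x => x)]
  -- B side: groups fold, its keys, its lookups, and the expansion loop
  rw [pv_groups_slice]
  set ps := pvPf ((PySem.Dict.ofList database).items) with hps
  have hkeys : ((ps.foldl (fun d p => d.modify p.1 [] (fun l => l ++ [p.2]))
      (PySem.Dict.empty : PySem.Dict String (List Int))).keys)
      = PySem.Set.ofList (ps.map (fun p => p.1)) := by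
    rw [PySem.Dict.keys_foldl_modify_key]
    rfl
  have hget : ∀ u, (ps.foldl (fun d p => d.modify p.1 [] (fun l => l ++ [p.2]))
      (PySem.Dict.empty : PySem.Dict String (List Int))).getD u []
      = (ps.filter (fun p => p.1 == u)).map (fun p => p.2) := by
    intro u
    rw [PySem.Dict.getD_foldl_modify_append]
    simp [PySem.Dict.getD_empty]
  rw [hkeys]
  rw [pv_expand_fold]
  simp only [List.nil_append, hget]
  -- identify the two flatMaps with the stable sort of ps
  refine Prod.ext ?_ (Prod.ext ?_ (Prod.ext ?_ ?_))
  · -- static users: equal sorts of pvSf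
    simp only [pvSf, pvS1]
  · -- regular users
    dsimp only
    have hrepl : (PySem.List.sorted (PySem.Set.ofList (ps.map (fun p => p.1))) (fun x => x)).flatMap
        (fun u => List.replicate ((ps.filter (fun p => p.1 == u)).map (fun p => p.2)).length u)
        = (PySem.List.sorted (PySem.Set.ofList (ps.map (fun p => p.1))) (fun x => x)).flatMap
        (fun u => (ps.filter (fun p => p.1 == u)).map (fun p => p.1)) := by
      refine (List.flatMap_congr ?_).symm
      intro u _
      exact pv_map_fst_replicate u _ (fun y hy => beq_iff_eq.mp (List.mem_filter.mp hy).2)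
    rw [hrepl, ← List.map_flatMap, pv_B_ru_bw]
  · -- bandwidths
    dsimp only
    rw [← List.map_flatMap, pv_B_ru_bw]
  · -- const hosts
    simp only [pvHf]
    refine List.flatMap_congr ?_
    intro p _
    by_cases h : PySem.List.slice p.1.toList none (some (-1)) = "slice".toList
    · rw [if_pos h, if_neg (not_not_intro h)]
    · rw [if_neg h, if_pos h]
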